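-- pv_equiv track=rewrite | github.com/gmgormaz/ProyectoPractica.exe | ProcesadorCSV/app/jobs/Tabla_T_EC.py | _build_circuito_a_dif
-- ===== SOURCE A (Python) =====
-- def _build_circuito_a_dif(nc: list[int]) -> dict[int, int]:
--
--     circuito_a_dif = {}
--     circuito_global = 1
--
--     for dif_idx, n in enumerate(nc, start=1):
--         n = int(n)
--         if n < 0:
--             raise ValueError("Circuitos por diferencial no puede ser negativo.")
--         for _ in range(n):
--             circuito_a_dif[circuito_global] = dif_idx
--             circuito_global += 1
--
--     return circuito_a_dif
-- ===== SOURCE B (Python) =====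
-- def _build_circuito_a_dif(nc: list[int]) -> dict[int, int]:
--     # Prefix sums + per-key binary search: cum[i] = circuits in the first i
--     # differentials; global circuit g belongs to the first differential whose
--     # cumulative count reaches g.
--     cum = [0]
--     for n in nc:
--         n = int(n)
--         if n < 0:
--             raise ValueError("Circuitos por diferencial no puede ser negativo.")
--         cum.append(cum[-1] + n)
--     result = {}
--     for g in range(1, cum[-1] + 1):
--         lo, hi = 0, len(nc) - 1
--         while lo < hi:
--             mid = (lo + hi) // 2
--             if cum[mid + 1] >= g:
--                 hi = mid
--             else:
--                 lo = mid + 1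
--         result[g] = lo + 1
--     return result
-- ===== Notes on version B (the rewrite author's own statement) =====
-- stated objective: alternative
-- what changed: B replaces A's nested expansion loops (a shared global counter writing n entries per differential) with a prefix-sum table over the counts plus a hand-written binary search: each global circuit number g is mapped to the first differential whose cumulative count reaches g.
import Mathlib
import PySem

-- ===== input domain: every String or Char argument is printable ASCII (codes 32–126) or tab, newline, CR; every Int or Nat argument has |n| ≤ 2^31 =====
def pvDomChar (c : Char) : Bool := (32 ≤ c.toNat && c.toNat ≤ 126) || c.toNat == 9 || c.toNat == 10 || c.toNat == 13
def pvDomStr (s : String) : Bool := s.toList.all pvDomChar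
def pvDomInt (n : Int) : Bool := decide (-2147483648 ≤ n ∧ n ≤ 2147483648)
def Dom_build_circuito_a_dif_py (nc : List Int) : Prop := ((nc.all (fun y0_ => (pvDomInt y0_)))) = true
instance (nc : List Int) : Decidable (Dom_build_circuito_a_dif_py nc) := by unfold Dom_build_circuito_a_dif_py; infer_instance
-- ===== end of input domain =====

-- B replaces the nested expansion loops by a prefix-sum table plus a binary search per
-- global circuit number; equivalence is about the return value, neither mutates its argument.

-- ===== PORT A =====
def build_circuito_a_dif_py (nc : List Int) : List (Int × Int) :=
  let res := (PySem.List.enumerate nc 1).foldl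
      (fun (st : PySem.Dict Int Int × Int) p =>
        (PySem.List.pyRange 0 p.2 1).foldl
          (fun st2 _ => (st2.1.insert st2.2 p.1, st2.2 + 1)) st)
      (PySem.Dict.empty, 1)
  res.1.items

-- ===== PORT B =====
-- the `while lo < hi` binary-search loop of Source B (cum[mid+1] is always in range when
-- the loop runs on B's own data, so the `.getD 0` default is never consulted there);
-- the fuel argument hi - lo only makes the loop structurally total: each iteration
-- shrinks hi - lo by at least one, so the guard lo < hi always fails before fuel runs out
def pvSearchGo (cum : List Int) (g : Int) : Nat → Int → Int → Int
  | 0, lo, _ => lo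
  | fuel + 1, lo, hi =>
    if lo < hi then
      let mid := PySem.Int.floordiv (lo + hi) 2
      if g ≤ (PySem.List.pyGet? cum (mid + 1)).getD 0 then
        pvSearchGo cum g fuel lo mid
      else
        pvSearchGo cum g fuel (mid + 1) hi
    else lo

def pvSearch (cum : List Int) (g : Int) (lo hi : Int) : Int :=
  pvSearchGo cum g (hi - lo).toNat lo hi

def build_circuito_a_dif_py_alt (nc : List Int) : List (Int × Int) :=
  let cum := nc.foldl (fun acc n => acc ++ [(PySem.List.pyGet? acc (-1)).getD 0 + n]) [0]
  let total := (PySem.List.pyGet? cum (-1)).getD 0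
  ((PySem.List.pyRange 1 (total + 1) 1).foldl
      (fun (d : PySem.Dict Int Int) g =>
        d.insert g (pvSearch cum g 0 ((nc.length : Int) - 1) + 1))
      PySem.Dict.empty).items

-- ===== PRECONDITION & SPEC =====
-- Pre_ excludes exactly the inputs containing a negative count, on which Python A raises ValueError (B raises there too).
def Pre_build_circuito_a_dif_py (nc : List Int) : Prop := ∀ n ∈ nc, 0 ≤ n
instance (nc : List Int) : Decidable (Pre_build_circuito_a_dif_py nc) := by unfold Pre_build_circuito_a_dif_py; infer_instance
def pvWitness_build_circuito_a_dif_py : List Int := [1, 0, 2]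

def Spec_build_circuito_a_dif_py (nc : List Int) (out : List (Int × Int)) : Prop := out = build_circuito_a_dif_py_alt nc
instance (nc : List Int) (out : List (Int × Int)) : Decidable (Spec_build_circuito_a_dif_py nc out) := by unfold Spec_build_circuito_a_dif_py; infer_instance

-- ===== CLAIM (what is proved, stated in full; the proofs are below) =====
def Claim_equal_build_circuito_a_dif_py : Prop := ∀ (nc : List Int), Dom_build_circuito_a_dif_py nc → Pre_build_circuito_a_dif_py nc → Spec_build_circuito_a_dif_py nc (build_circuito_a_dif_py nc)

-- ===== LEMMAS AND PROOFS =====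

-- ---- A-side characterisation: items = enumerate of the flattened counts ----

-- a fold that ignores the list elements is an iterate of its step
theorem pv_foldl_const {α β : Type} (l : List β) (h : α → α) (init : α) :
    l.foldl (fun st _ => h st) init = h^[l.length] init := by
  induction l generalizing init <;> simp_all [Function.iterate_succ_apply]

-- A's inner loop: m fresh inserts at consecutive keys append m pairs
theorem pv_inner (dif g : Int) (m : Nat) (d : PySem.Dict Int Int)
    (hb : ∀ k ∈ d.keys, k < g) :
    ((fun st : PySem.Dict Int Int × Int => (st.1.insert st.2 dif, st.2 + 1))^[m] (d, g)).1.items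
      = d.items ++ (PySem.List.pyRange g (g + (m : Int)) 1).map (fun k => (k, dif))
    ∧ ((fun st : PySem.Dict Int Int × Int => (st.1.insert st.2 dif, st.2 + 1))^[m] (d, g)).2
      = g + (m : Int) := by
  induction m with
  | zero => simp [PySem.List.pyRange_one_eq_nil]
  | succ m ih =>
    obtain ⟨hit, hcnt⟩ := ih
    rw [Function.iterate_succ_apply']
    set r := (fun st : PySem.Dict Int Int × Int => (st.1.insert st.2 dif, st.2 + 1))^[m] (d, g) with hr
    have hkeys : r.1.keys = d.keys ++ PySem.List.pyRange g (g + (m : Int)) 1 := by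
      simp only [PySem.Dict.keys, hit, List.map_append, List.map_map]
      simp [Function.comp_def]
    have hfresh : r.1.contains (g + (m : Int)) = false := by
      rw [PySem.Dict.contains_eq_decide_mem_keys, hkeys, decide_eq_false_iff_not]
      simp only [List.mem_append, PySem.List.mem_pyRange_one]
      rintro (hmem | ⟨_, hlt⟩)
      · have := hb _ hmem; omega
      · omega
    have hstep : g + ((m + 1 : Nat) : Int) = (g + (m : Int)) + 1 := by push_cast; ring
    refine ⟨?_, ?_⟩
    · rw [hcnt, PySem.Dict.items_insert_of_not_contains _ _ hfresh, hit,
        hstep, PySem.List.pyRange_one_succ_right (by omega)]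
      simp
    · rw [hcnt]; push_cast; ring

-- enumerate of a replicate block is the pyRange of its global indices
theorem pv_enum_replicate (v g : Int) (m : Nat) :
    PySem.List.enumerate (List.replicate m v) g
      = (PySem.List.pyRange g (g + (m : Int)) 1).map (fun k => (k, v)) := by
  induction m with
  | zero => simp [PySem.List.enumerate_nil, PySem.List.pyRange_one_eq_nil]
  | succ m ihm =>
    rw [List.replicate_succ', PySem.List.enumerate_append, ihm]
    have h1 : g + ((List.replicate m v).length : Int) = g + (m : Int) := by simp
    have h2 : g + ((m + 1 : Nat) : Int) = (g + (m : Int)) + 1 := by push_cast; ring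
    rw [h1, h2, PySem.List.pyRange_one_succ_right (by omega)]
    simp [PySem.List.enumerate_cons, PySem.List.enumerate_nil]

-- A's outer loop: items grow by the enumerate of the flattened counts
theorem pv_outer (nc : List Int) (s g : Int) (d : PySem.Dict Int Int)
    (hb : ∀ k ∈ d.keys, k < g) :
    ((PySem.List.enumerate nc s).foldl
        (fun (st : PySem.Dict Int Int × Int) p =>
          (PySem.List.pyRange 0 p.2 1).foldl
            (fun st2 _ => (st2.1.insert st2.2 p.1, st2.2 + 1)) st)
        (d, g)).1.items
      = d.items ++ PySem.List.enumerate
          ((PySem.List.enumerate nc s).flatMap (fun p => List.replicate p.2.toNat p.1)) g := by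
  induction nc generalizing s g d with
  | nil => simp [PySem.List.enumerate_nil]
  | cons n t ih =>
    rw [PySem.List.enumerate_cons]
    simp only [List.foldl_cons, List.flatMap_cons]
    have hlen : (PySem.List.pyRange 0 n 1).length = n.toNat := by
      rw [PySem.List.length_pyRange_one]; simp
    rw [pv_foldl_const, hlen]
    obtain ⟨hit, hcnt⟩ := pv_inner s g n.toNat d hb
    set r := (fun st : PySem.Dict Int Int × Int => (st.1.insert st.2 s, st.2 + 1))^[n.toNat] (d, g) with hrdef
    have hr : r = (r.1, g + (n.toNat : Int)) := by rw [← hcnt]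
    have hb' : ∀ k ∈ r.1.keys, k < g + (n.toNat : Int) := by
      have hkeys : r.1.keys = d.keys ++ PySem.List.pyRange g (g + (n.toNat : Int)) 1 := by
        simp only [PySem.Dict.keys, hit, List.map_append, List.map_map]
        simp [Function.comp_def]
      rw [hkeys]
      intro k hk
      rcases List.mem_append.mp hk with hk | hk
      · have := hb _ hk; omega
      · have := (PySem.List.mem_pyRange_one).mp hk; omega
    rw [hr, ih (s + 1) (g + (n.toNat : Int)) r.1 hb', hit,
        PySem.List.enumerate_append, List.append_assoc]
    congr 2
    · rw [pv_enum_replicate]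
    · congr 1
      simp

-- ---- B-side characterisation ----

-- the tail of Source B's cum list, as a structural recursion (proof artefact only)
def pvCum : List Int → Int → List Int
  | [], _ => []
  | n :: t, s => (s + n) :: pvCum t (s + n)

theorem pvCum_length (nc : List Int) (s : Int) : (pvCum nc s).length = nc.length := by
  induction nc generalizing s <;> simp_all [pvCum]

-- B's first loop builds 0 :: pvCum nc 0
theorem pv_cum_fold (nc : List Int) : ∀ (acc : List Int) (x : Int),
    PySem.List.pyGet? acc (-1) = some x →
    nc.foldl (fun acc n => acc ++ [(PySem.List.pyGet? acc (-1)).getD 0 + n]) acc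
      = acc ++ pvCum nc x := by
  induction nc with
  | nil => intro acc x _; simp [pvCum]
  | cons n t ih =>
    intro acc x hx
    simp only [List.foldl_cons, hx, Option.getD_some, pvCum]
    rw [ih (acc ++ [x + n]) (x + n) (PySem.List.pyGet?_neg_one_append_singleton acc (x + n)), List.append_assoc]
    rfl

-- indexing the cum list gives the shifted prefix sums of the counts
theorem pv_cum_get (nc : List Int) : ∀ (s : Int) (j : Nat), j ≤ nc.length →
    (s :: pvCum nc s)[j]? = some (s + (nc.take j).sum) := by
  induction nc with
  | nil =>
    intro s j hj
    have : j = 0 := by simp at hj; omega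
    subst this
    simp
  | cons n t ih =>
    intro s j hj
    cases j with
    | zero => simp
    | succ j =>
      simp only [pvCum, List.getElem?_cons_succ, List.take_succ_cons, List.sum_cons]
      rw [ih (s + n) j (by simpa using hj)]
      congr 1; ring

-- prefix sums of nonnegative counts are monotone
theorem pv_take_sum_mono (nc : List Int) (hpos : ∀ n ∈ nc, 0 ≤ n) (i j : Nat) (hij : i ≤ j) :
    (nc.take i).sum ≤ (nc.take j).sum := by
  have h := List.sum_take_add_sum_drop (nc.take j) i
  rw [List.take_take, min_eq_left hij] at h
  have hd : 0 ≤ ((nc.take j).drop i).sum := by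
    apply List.sum_nonneg
    intro x hx
    exact hpos x (List.mem_of_mem_take (List.mem_of_mem_drop hx))
  omega

-- the binary search returns the unique split point a
theorem pvSearchGo_eq (cum : List Int) (g : Int) (a : Int) : ∀ (fuel : Nat) (lo hi : Int),
    (hi - lo).toNat ≤ fuel → lo ≤ a → a ≤ hi →
    (∀ i, lo ≤ i → i < a → ¬ (g ≤ (PySem.List.pyGet? cum (i + 1)).getD 0)) →
    (∀ i, a ≤ i → i ≤ hi → g ≤ (PySem.List.pyGet? cum (i + 1)).getD 0) →
    pvSearchGo cum g fuel lo hi = a := by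
  intro fuel
  induction fuel with
  | zero => intro lo hi hf hloa hahi _ _; simp only [pvSearchGo]; omega
  | succ fuel ih =>
    intro lo hi hf hloa hahi hlt hge
    simp only [pvSearchGo]
    by_cases hlh : lo < hi
    · simp only [hlh, if_pos]
      have hmid := PySem.Int.floordiv_two_mid_bounds (lo := lo) (hi := hi) (by omega)
      have hmlt : PySem.Int.floordiv (lo + hi) 2 < hi := by
        have := PySem.Int.floordiv_lt_iff_lt_mul (a := lo + hi) (b := 2) (q := hi) (by omega)
        omega
      set mid := PySem.Int.floordiv (lo + hi) 2 with hmiddef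
      by_cases hcond : g ≤ (PySem.List.pyGet? cum (mid + 1)).getD 0
      · simp only [hcond, if_pos]
        have hamid : a ≤ mid := by
          by_contra hc
          exact hlt mid (by omega) (by omega) hcond
        exact ih lo mid (by omega) hloa hamid
          (fun i h1 h2 => hlt i h1 h2) (fun i h1 h2 => hge i h1 (by omega))
      · simp only [hcond, if_neg, not_false_iff]
        have hamid : mid + 1 ≤ a := by
          by_contra hc
          exact hcond (hge mid (by omega) (by omega))
        exact ih (mid + 1) hi (by omega) hamid hahi
          (fun i h1 h2 => hlt i (by omega) h2) (fun i h1 h2 => hge i h1 h2)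
    · simp only [hlh, if_neg, not_false_iff]
      omega

theorem pvSearch_eq (cum : List Int) (g : Int) (a : Int) (lo hi : Int)
    (hloa : lo ≤ a) (hahi : a ≤ hi)
    (hlt : ∀ i, lo ≤ i → i < a → ¬ (g ≤ (PySem.List.pyGet? cum (i + 1)).getD 0))
    (hge : ∀ i, a ≤ i → i ≤ hi → g ≤ (PySem.List.pyGet? cum (i + 1)).getD 0) :
    pvSearch cum g lo hi = a :=
  pvSearchGo_eq cum g a (hi - lo).toNat lo hi le_rfl hloa hahi hlt hge

-- position m of the flattened counts lies in block a when the prefix sums bracket m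
theorem pv_flat_at (nc : List Int) : ∀ (s : Int) (m a : Nat),
    (∀ n ∈ nc, 0 ≤ n) → a < nc.length →
    (nc.take a).sum ≤ (m : Int) → (m : Int) < (nc.take (a + 1)).sum →
    ((PySem.List.enumerate nc s).flatMap (fun p => List.replicate p.2.toNat p.1))[m]?
      = some (s + (a : Int)) := by
  induction nc with
  | nil => intro s m a _ h; simp at h
  | cons n t ih =>
    intro s m a hpos ha hlow hhigh
    rw [PySem.List.enumerate_cons]
    simp only [List.flatMap_cons]
    have hn0 : 0 ≤ n := hpos n (by simp)
    have hsum0 : ∀ k : Nat, 0 ≤ (t.take k).sum := fun k =>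
      List.sum_nonneg (fun x hx => hpos x (by simp [List.mem_of_mem_take hx]))
    cases a with
    | zero =>
      simp only [List.take_succ_cons, List.take_zero, List.sum_cons, List.sum_nil, add_zero] at hhigh
      rw [List.getElem?_append_left (by simp; omega)]
      rw [List.getElem?_replicate]
      simp only [if_pos (by omega : m < n.toNat)]
      simp
    | succ a =>
      simp only [List.take_succ_cons, List.sum_cons] at hlow hhigh
      have hmn : n.toNat ≤ m := by have := hsum0 a; omega
      rw [List.getElem?_append_right (by simp; omega)]
      simp only [List.length_replicate]
      have := ih (s + 1) (m - n.toNat) a (fun x hx => hpos x (by simp [hx]))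
        (by simpa using ha) (by omega) (by omega)
      rw [this]
      congr 1
      push_cast
      ring

-- every g in [1, sum] has a block: first index a with prefix sum ≥ g
theorem pv_exists_block (nc : List Int) : ∀ (g : Int),
    (∀ n ∈ nc, 0 ≤ n) → 1 ≤ g → g ≤ nc.sum →
    ∃ a : Nat, a < nc.length ∧ (nc.take a).sum < g ∧ g ≤ (nc.take (a + 1)).sum := by
  induction nc with
  | nil => intro g _ h1 h2; simp at h2; omega
  | cons n t ih =>
    intro g hpos h1 h2
    by_cases hg : g ≤ n
    · exact ⟨0, by simp, by simpa using h1, by simpa using hg⟩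
    · obtain ⟨a, ha, hl, hh⟩ := ih (g - n) (fun x hx => hpos x (by simp [hx]))
        (by omega) (by simp at h2; omega)
      exact ⟨a + 1, by simpa using ha, by simp; omega, by simp; omega⟩

-- the flattened counts have sum-many entries
theorem pv_flat_length (nc : List Int) : ∀ (s : Int), (∀ n ∈ nc, 0 ≤ n) →
    (((PySem.List.enumerate nc s).flatMap (fun p => List.replicate p.2.toNat p.1)).length : Int)
      = nc.sum := by
  induction nc with
  | nil => intro s _; simp [PySem.List.enumerate_nil]
  | cons n t ih =>
    intro s hpos
    rw [PySem.List.enumerate_cons]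
    simp only [List.flatMap_cons, List.length_append, List.length_replicate, List.sum_cons]
    have := ih (s + 1) (fun x hx => hpos x (by simp [hx]))
    have hn0 : 0 ≤ n := hpos n (by simp)
    push_cast
    omega

-- a pair list with distinct keys round-trips through the dict fold
theorem pv_items_map (total : Int) (f : Int → Int) :
    ((PySem.List.pyRange 1 (total + 1) 1).foldl
        (fun (d : PySem.Dict Int Int) g => d.insert g (f g)) PySem.Dict.empty).items
      = (PySem.List.pyRange 1 (total + 1) 1).map (fun g => (g, f g)) := by
  have h := PySem.Dict.items_foldl_insert_fresh (l := PySem.List.pyRange 1 (total + 1) 1)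
      (k := fun g => g) (v := f) (d := PySem.Dict.empty)
      (by intro a _; simp) (by simpa using PySem.List.nodup_pyRange_one 1 (total + 1))
  simpa using h

-- ===== VERDICT (by name: the statement is the Claim_ definition above) =====
theorem build_circuito_a_dif_py_spec : Claim_equal_build_circuito_a_dif_py := by
  intro nc _ hpre
  unfold Spec_build_circuito_a_dif_py build_circuito_a_dif_py build_circuito_a_dif_py_alt
  -- A's items are the enumerate of the flattened counts
  have hA := pv_outer nc 1 1 PySem.Dict.empty (by simp)
  simp only [hA]
  have hemp : (PySem.Dict.empty (κ := Int) (ν := Int)).items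
      ++ PySem.List.enumerate ((PySem.List.enumerate nc 1).flatMap
          (fun p => List.replicate p.2.toNat p.1)) 1
      = PySem.List.enumerate ((PySem.List.enumerate nc 1).flatMap
          (fun p => List.replicate p.2.toNat p.1)) 1 := rfl
  rw [hemp]
  set flat := (PySem.List.enumerate nc 1).flatMap (fun p => List.replicate p.2.toNat p.1) with hflat
  -- B's cum list and its last entry
  have hcum : nc.foldl (fun acc n => acc ++ [(PySem.List.pyGet? acc (-1)).getD 0 + n]) [0]
      = 0 :: pvCum nc 0 := by
    have := pv_cum_fold nc [0] 0 (by decide)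
    simpa using this
  simp only [hcum]
  have hcumlen : (0 :: pvCum nc 0).length = nc.length + 1 := by simp [pvCum_length]
  have htotal : (PySem.List.pyGet? (0 :: pvCum nc 0) (-1)).getD 0 = nc.sum := by
    rw [PySem.List.pyGet?_neg_one, List.getLast?_eq_getElem?, hcumlen]
    simp only [Nat.add_sub_cancel]
    rw [pv_cum_get nc 0 nc.length le_rfl]
    simp
  simp only [htotal]
  rw [pv_items_map]
  -- index-wise equality
  have hflen : (flat.length : Int) = nc.sum := pv_flat_length nc 1 hpre
  apply List.ext_getElem
  · simp only [List.length_map, PySem.List.length_pyRange_one, PySem.List.length_enumerate]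
    omega
  · intro j hj1 hj2
    simp only [List.getElem_map, PySem.List.getElem_pyRange_one, PySem.List.getElem_enumerate]
    rw [PySem.List.length_enumerate] at hj1
    -- the split point for g = 1 + j
    obtain ⟨a, halen, hlow, hhigh⟩ := pv_exists_block nc (1 + (j : Int)) hpre (by omega) (by omega)
    have hval : flat[j]? = some (1 + (a : Int)) :=
      pv_flat_at nc 1 j a hpre halen (by omega) (by omega)
    have hvj : flat[j] = 1 + (a : Int) := by
      have := List.getElem?_eq_getElem hj1 (l := flat)
      rw [hval] at this
      exact (Option.some.injEq _ _).mp this.symm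
    have hsearch : pvSearch (0 :: pvCum nc 0) (1 + (j : Int)) 0 ((nc.length : Int) - 1)
        = (a : Int) := by
      apply pvSearch_eq
      · omega
      · omega
      · intro i h0i hia
        have hget : PySem.List.pyGet? (0 :: pvCum nc 0) (i + 1)
            = some ((nc.take (i.toNat + 1)).sum) := by
          rw [PySem.List.pyGet?_of_nonneg (0 :: pvCum nc 0) (by omega)]
          have : (i + 1).toNat = i.toNat + 1 := by omega
          rw [this, pv_cum_get nc 0 (i.toNat + 1) (by omega)]
          simp
        rw [hget]
        simp only [Option.getD_some]
        have hmono := pv_take_sum_mono nc hpre (i.toNat + 1) a (by omega)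
        omega
      · intro i hai hile
        have hget : PySem.List.pyGet? (0 :: pvCum nc 0) (i + 1)
            = some ((nc.take (i.toNat + 1)).sum) := by
          rw [PySem.List.pyGet?_of_nonneg (0 :: pvCum nc 0) (by omega)]
          have : (i + 1).toNat = i.toNat + 1 := by omega
          rw [this, pv_cum_get nc 0 (i.toNat + 1) (by omega)]
          simp
        rw [hget]
        simp only [Option.getD_some]
        have hmono := pv_take_sum_mono nc hpre (a + 1) (i.toNat + 1) (by omega)
        omega
    rw [hsearch, hvj]
    simp only [Prod.mk.injEq]
    exact ⟨trivial, by ring⟩
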